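-- pv_equiv track=rewrite | github.com/paris3200/AdventOfCode | code/2015/01.py | part_one
-- ===== SOURCE A (Python) =====
-- def part_one(data):
--     input = list(data[0])
--     floor = 0
--     for instruction in input:
--         if instruction == "(":
--             floor += 1
--         elif instruction == ")":
--             floor -= 1
--     return floor
-- ===== SOURCE B (Python) =====
-- def part_one(data):
--     return data[0].count("(") - data[0].count(")")
-- ===== Notes on version B (the rewrite author's own statement) =====
-- stated objective: idiomatic
-- what changed: Replaces the single-pass running-balance loop over the characters with two library count scans (count of '(' minus count of ')') and a subtraction.
import Mathlib
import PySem

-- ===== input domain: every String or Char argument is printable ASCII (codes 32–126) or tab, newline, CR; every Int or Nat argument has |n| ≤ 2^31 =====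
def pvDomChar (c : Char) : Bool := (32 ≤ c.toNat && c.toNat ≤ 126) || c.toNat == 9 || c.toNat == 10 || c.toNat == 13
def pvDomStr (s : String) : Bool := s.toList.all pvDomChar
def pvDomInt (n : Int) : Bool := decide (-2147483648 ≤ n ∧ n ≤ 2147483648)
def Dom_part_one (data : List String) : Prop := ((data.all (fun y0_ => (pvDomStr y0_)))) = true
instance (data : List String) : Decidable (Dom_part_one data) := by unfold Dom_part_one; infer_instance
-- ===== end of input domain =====

-- B replaces A's running-balance loop with two library count scans ('(' count minus ')' count); same O(n) cost.


-- ===== PORT A =====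
-- data[0] raises IndexError on empty data; that input is outside Pre_ (the [] branch's 0 is a totality default only).
def part_one (data : List String) : Int :=
  match data with
  | [] => 0
  | s :: _ =>
    (s.toList).foldl
      (fun floor instruction =>
        if instruction = '(' then floor + 1
        else if instruction = ')' then floor - 1
        else floor) 0

-- ===== PORT B =====
def part_one_alt (data : List String) : Int :=
  match data with
  | [] => 0
  | s :: _ => (PySem.Str.count s "(" : Int) - (PySem.Str.count s ")" : Int)

-- ===== PRECONDITION & SPEC =====
-- Pre_ excludes exactly the empty list, on which A raises IndexError at data[0].
def Pre_part_one (data : List String) : Prop := data ≠ []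
instance (data : List String) : Decidable (Pre_part_one data) := by unfold Pre_part_one; infer_instance
def pvWitness_part_one : List String := ["(()"]
def Spec_part_one (data : List String) (out : Int) : Prop := out = part_one_alt data
instance (data : List String) (out : Int) : Decidable (Spec_part_one data out) := by unfold Spec_part_one; infer_instance

-- ===== CLAIM (what is proved, stated in full; the proofs are below) =====
def Claim_equal_part_one : Prop := ∀ (data : List String), Dom_part_one data → Pre_part_one data → Spec_part_one data (part_one data)

-- ===== LEMMAS AND PROOFS =====

theorem go_single (x : Char) (l : List Char) : ∀ (fuel : Nat), l.length ≤ fuel → ∀ acc,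
    PySem.Chars.count.go [x] fuel l acc = acc + l.count x := by
  induction l with
  | nil => intro fuel h acc; cases fuel <;> simp [PySem.Chars.count.go]
  | cons c t ih =>
    intro fuel h acc
    match fuel with
    | fuel + 1 =>
      rw [PySem.Chars.count.go]
      by_cases hc : c = x
      · simp [List.isPrefixOf, hc, ih fuel (by simpa using h)]; omega
      · simp [List.isPrefixOf, hc, Ne.symm hc, ih fuel (by simpa using h)]

theorem count_single (cs : List Char) (x : Char) :
    PySem.Chars.count cs [x] = cs.count x := by
  simp [PySem.Chars.count, go_single x cs cs.length le_rfl 0]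

theorem balance_foldl (cs : List Char) (acc : Int) :
    cs.foldl
      (fun floor instruction =>
        if instruction = '(' then floor + 1
        else if instruction = ')' then floor - 1
        else floor) acc
    = acc + (cs.count '(' : Int) - (cs.count ')' : Int) := by
  induction cs generalizing acc with
  | nil => simp
  | cons c cs ih =>
    simp only [List.foldl_cons, List.count_cons, ih]
    by_cases h1 : c = '(' <;> by_cases h2 : c = ')' <;> simp [h1, h2] <;> omega

-- ===== VERDICT (by name: the statement is the Claim_ definition above) =====
theorem part_one_spec : Claim_equal_part_one := by
  intro data _ hpre
  match data with
  | [] => exact absurd rfl hpre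
  | s :: rest =>
    show _ = _
    have hl : ("(" : String).toList = ['('] := by decide
    have hr : (")" : String).toList = [')'] := by decide
    simp only [part_one, part_one_alt, balance_foldl, PySem.Str.count_eq, hl, hr,
      count_single]
    omega
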